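-- pv_equiv track=rewrite | github.com/pvtrov/algorithms-and-data-structures | excercises from course/colloquiums/2020_21/zal 2/zad3/zad3.py | DFS
-- ===== SOURCE A (Python) =====
-- def DFS(P, t, V):
--     if V[t] == True:
--         return 0
--     res = len(P[t])
--     V[t] = True
--
--     for e in P[t]:
--         res += DFS(P, e, V)
--     return res
-- ===== SOURCE B (Python) =====
-- # B: iterative DFS with an explicit stack instead of A's recursion; mutates V exactly as A does.
-- def DFS(P, t, V):
--     total = 0
--     stack = [t]
--     while stack:
--         node = stack.pop()
--         if V[node]:
--             continue
--         V[node] = True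
--         total += len(P[node])
--         stack.extend(reversed(P[node]))
--     return total
-- ===== Notes on version B (the rewrite author's own statement) =====
-- stated objective: alternative
-- what changed: A's recursive DFS is replaced by an iterative DFS with an explicit stack and a running total (no recursion at all); V is mutated to the same final state.
import Mathlib
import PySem

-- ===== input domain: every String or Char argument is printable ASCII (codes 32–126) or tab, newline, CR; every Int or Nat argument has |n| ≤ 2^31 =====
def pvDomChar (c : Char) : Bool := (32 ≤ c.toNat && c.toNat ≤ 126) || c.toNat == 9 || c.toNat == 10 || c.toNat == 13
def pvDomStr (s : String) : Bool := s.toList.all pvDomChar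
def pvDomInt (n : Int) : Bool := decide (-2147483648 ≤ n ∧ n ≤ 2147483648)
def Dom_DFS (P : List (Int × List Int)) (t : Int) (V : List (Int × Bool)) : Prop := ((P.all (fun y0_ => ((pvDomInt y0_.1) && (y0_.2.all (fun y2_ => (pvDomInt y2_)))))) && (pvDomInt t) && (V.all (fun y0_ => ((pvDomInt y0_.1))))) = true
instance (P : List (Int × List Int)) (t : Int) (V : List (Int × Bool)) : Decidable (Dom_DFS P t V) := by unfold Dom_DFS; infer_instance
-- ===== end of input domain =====

-- B replaces A's recursive DFS by an explicit-stack loop with a running total; both Pythons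
-- mutate V to the same final marking, and the theorem below is about the return value.

-- ===== PORT A =====
-- A's recursive DFS; the Nat argument is fuel (DFS passes V.length + 1, always enough, since
-- every level of real recursion turns a False entry of V into True).
def dfsGo (P : PySem.Dict Int (List Int)) : Nat → Int → PySem.Dict Int Bool → Int × PySem.Dict Int Bool
  | 0, _, V => (0, V)
  | fuel+1, t, V =>
    match V.get? t with
    | none => (0, V)            -- V[t] raises KeyError: excluded by Pre_DFS
    | some true => (0, V)
    | some false =>
      -- res = len(P[t]); V[t] = True; for e in P[t]: res += DFS(P, e, V)
      ((P.get? t).getD []).foldl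
        (fun s e => let r := dfsGo P fuel e s.2; (s.1 + r.1, r.2))
        (((((P.get? t).getD []).length : Int)), V.insert t true)

def DFS (P : List (Int × List Int)) (t : Int) (V : List (Int × Bool)) : Int :=
  (dfsGo (PySem.Dict.mk P) (V.length + 1) t (PySem.Dict.mk V)).1

-- ===== PORT B =====
-- Termination measure for Source B's while-loop: |stack| + Σ over still-False entries of (1 + degree).
def pvW (P : PySem.Dict Int (List Int)) (p : Int × Bool) : Nat := 1 + ((P.get? p.1).getD []).length

def pvWsum (P : PySem.Dict Int (List Int)) (l : List (Int × Bool)) : Nat :=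
  ((l.filter (fun p => !p.2)).map (pvW P)).sum

lemma pvWsum_map_le (P : PySem.Dict Int (List Int)) (t : Int) :
    ∀ l : List (Int × Bool),
      pvWsum P (l.map (fun p => if (p.1 == t) = true then (t, true) else p)) ≤ pvWsum P l := by
  intro l
  induction l with
  | nil => simp [pvWsum]
  | cons p l ih =>
    rcases p with ⟨k, b⟩
    by_cases hp : (k == t) = true
    · cases b <;> simp_all [pvWsum] <;> omega
    · cases b <;> simp_all [pvWsum] <;> omega

lemma pvWsum_map_lt (P : PySem.Dict Int (List Int)) (t : Int) :
    ∀ l : List (Int × Bool), (t, false) ∈ l →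
      pvWsum P (l.map (fun p => if (p.1 == t) = true then (t, true) else p)) + pvW P (t, false) ≤ pvWsum P l := by
  intro l
  induction l with
  | nil => simp
  | cons p l ih =>
    intro hm
    rcases p with ⟨k, b⟩
    by_cases hp : (k == t) = true
    · have hk : k = t := by simpa using hp
      cases b
      · have h1 := pvWsum_map_le P t l
        simp_all [pvWsum, pvW]
        omega
      · have hm' : (t, false) ∈ l := by
          rcases List.mem_cons.mp hm with h | h
          · exact absurd h (by simp)
          · exact h
        have := ih hm'
        simp_all [pvWsum]
    · have hm' : (t, false) ∈ l := by
        rcases List.mem_cons.mp hm with h | h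
        · exfalso; apply hp; rw [Prod.ext_iff] at h; simp at h; simp [h.1]
        · exact h
      have := ih hm'
      cases b <;> simp_all [pvWsum] <;> omega

lemma dfsStack_dec (P : PySem.Dict Int (List Int)) (V : PySem.Dict Int Bool) (node : Int)
    (h : V.get? node = some false) (st : List Int) :
    (((P.get? node).getD []) ++ st).length + pvWsum P ((V.insert node true).items)
      < (node :: st).length + pvWsum P V.items := by
  have hc : V.contains node = true := by
    rw [PySem.Dict.contains_eq_isSome_get?, h]; rfl
  have hi := PySem.Dict.items_insert_of_contains V (k := node) true hc
  have hmem : (node, false) ∈ V.items := PySem.Dict.mem_items_of_get?_eq_some V h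
  have hlt := pvWsum_map_lt P node V.items hmem
  rw [hi]
  simp only [List.length_append, List.length_cons]
  have : pvW P (node, false) = 1 + ((P.get? node).getD []).length := rfl
  omega

-- Source B's loop; the stack is kept top-first (Python pops from the end and pushes reversed(P[node]),
-- so the Lean list `adj ++ st` is exactly the Python stack read from its top).
def dfsStack (P : PySem.Dict Int (List Int)) : List Int → PySem.Dict Int Bool → Int → Int × PySem.Dict Int Bool
  | [], V, acc => (acc, V)
  | node :: st, V, acc =>
    match h : V.get? node with
    | none => (acc, V)          -- V[node] raises KeyError: excluded by Pre_DFS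
    | some true => dfsStack P st V acc
    | some false =>
      dfsStack P (((P.get? node).getD []) ++ st) (V.insert node true)
        (acc + ((((P.get? node).getD []).length : Int)))
  termination_by st V _ => st.length + pvWsum P V.items
  decreasing_by
  · simp [pvWsum]
  · exact dfsStack_dec P V node h st

def DFS_alt (P : List (Int × List Int)) (t : Int) (V : List (Int × Bool)) : Int :=
  (dfsStack (PySem.Dict.mk P) [t] (PySem.Dict.mk V) 0).1

-- ===== PRECONDITION & SPEC =====
-- Pre_DFS: the traversal never hits a missing key — some set S of V's keys contains t, is
-- closed under adjacency at nodes still marked False, and its False members are keys of P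
-- (exactly the inputs on which the Python returns instead of raising KeyError).
def Pre_DFS (P : List (Int × List Int)) (t : Int) (V : List (Int × Bool)) : Prop :=
  ∃ S ∈ (V.map Prod.fst).sublists, t ∈ S ∧
    ∀ x ∈ S, (PySem.Dict.mk V).get? x = some false →
      x ∈ P.map Prod.fst ∧ ∀ adj, (PySem.Dict.mk P).get? x = some adj → ∀ e ∈ adj, e ∈ S
instance (P : List (Int × List Int)) (t : Int) (V : List (Int × Bool)) : Decidable (Pre_DFS P t V) := by
  unfold Pre_DFS; infer_instance

def pvWitness_DFS : (List (Int × List Int)) × Int × (List (Int × Bool)) :=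
  ([(0, [1]), (1, [0])], 0, [(0, false), (1, false)])

def Spec_DFS (P : List (Int × List Int)) (t : Int) (V : List (Int × Bool)) (out : Int) : Prop := out = DFS_alt P t V
instance (P : List (Int × List Int)) (t : Int) (V : List (Int × Bool)) (out : Int) : Decidable (Spec_DFS P t V out) := by unfold Spec_DFS; infer_instance

-- ===== CLAIM (what is proved, stated in full; the proofs are below) =====
def Claim_equal_DFS : Prop := ∀ (P : List (Int × List Int)) (t : Int) (V : List (Int × Bool)), Dom_DFS P t V → Pre_DFS P t V → Spec_DFS P t V (DFS P t V)

-- ===== LEMMAS AND PROOFS =====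

-- the fold A's body performs over a list of nodes, with fixed fuel (definitionally dfsGo's fold)
def foldA (P : PySem.Dict Int (List Int)) (fuel : Nat) (L : List Int) (s : Int × PySem.Dict Int Bool) :
    Int × PySem.Dict Int Bool :=
  L.foldl (fun s e => let r := dfsGo P fuel e s.2; (s.1 + r.1, r.2)) s

def falseCount (V : PySem.Dict Int Bool) : Nat := (V.items.filter (fun p => !p.2)).length


lemma dfsGo_none (P : PySem.Dict Int (List Int)) (f : Nat) (t : Int) (V : PySem.Dict Int Bool)
    (h : V.get? t = none) : dfsGo P (f+1) t V = (0, V) := by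
  rw [dfsGo, h]

lemma dfsGo_true (P : PySem.Dict Int (List Int)) (f : Nat) (t : Int) (V : PySem.Dict Int Bool)
    (h : V.get? t = some true) : dfsGo P (f+1) t V = (0, V) := by
  rw [dfsGo, h]

lemma dfsGo_false (P : PySem.Dict Int (List Int)) (f : Nat) (t : Int) (V : PySem.Dict Int Bool)
    (h : V.get? t = some false) :
    dfsGo P (f+1) t V =
      foldA P f ((P.get? t).getD []) (((((P.get? t).getD []).length : Int)), V.insert t true) := by
  rw [dfsGo, h]; rfl

lemma dfsGo_zero (P : PySem.Dict Int (List Int)) (t : Int) (V : PySem.Dict Int Bool) :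
    dfsGo P 0 t V = (0, V) := rfl

lemma dfsStack_nil (P : PySem.Dict Int (List Int)) (V : PySem.Dict Int Bool) (acc : Int) :
    dfsStack P [] V acc = (acc, V) := by
  rw [dfsStack]

lemma dfsStack_true (P : PySem.Dict Int (List Int)) (x : Int) (st : List Int) (V : PySem.Dict Int Bool)
    (acc : Int) (h : V.get? x = some true) : dfsStack P (x :: st) V acc = dfsStack P st V acc := by
  rw [dfsStack]
  split <;> simp_all

lemma dfsStack_false (P : PySem.Dict Int (List Int)) (x : Int) (st : List Int) (V : PySem.Dict Int Bool)
    (acc : Int) (h : V.get? x = some false) :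
    dfsStack P (x :: st) V acc =
      dfsStack P (((P.get? x).getD []) ++ st) (V.insert x true)
        (acc + ((((P.get? x).getD []).length : Int))) := by
  rw [dfsStack]
  split <;> simp_all

lemma get?_of_mem_keys (V : PySem.Dict Int Bool) (x : Int) (h : x ∈ V.keys) :
    ∃ b, V.get? x = some b := by
  cases ho : V.get? x with
  | none => exact absurd ((PySem.Dict.get?_eq_none_iff_not_mem_keys V x).mp ho) (by simp [h])
  | some b => exact ⟨b, rfl⟩

lemma filtlen_map_le (t : Int) :
    ∀ l : List (Int × Bool),
      ((l.map (fun p => if (p.1 == t) = true then (t, true) else p)).filter (fun p => !p.2)).length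
        ≤ (l.filter (fun p => !p.2)).length := by
  intro l
  induction l with
  | nil => simp
  | cons p l ih =>
    rcases p with ⟨k, b⟩
    by_cases hp : (k == t) = true
    · cases b <;> simp_all <;> omega
    · cases b <;> simp_all <;> omega

lemma filtlen_map_lt (t : Int) :
    ∀ l : List (Int × Bool), (t, false) ∈ l →
      ((l.map (fun p => if (p.1 == t) = true then (t, true) else p)).filter (fun p => !p.2)).length
        < (l.filter (fun p => !p.2)).length := by
  intro l
  induction l with
  | nil => simp
  | cons p l ih =>
    intro hmem
    rcases p with ⟨k, b⟩
    by_cases hp : (k == t) = true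
    · have hk : k = t := by simpa using hp
      cases b
      · have h1 := filtlen_map_le t l
        simp_all
      · have hm' : (t, false) ∈ l := by
          rcases List.mem_cons.mp hmem with hh | hh
          · exact absurd hh (by simp)
          · exact hh
        have := ih hm'
        simp_all
    · have hm' : (t, false) ∈ l := by
        rcases List.mem_cons.mp hmem with hh | hh
        · exfalso; apply hp; rw [Prod.ext_iff] at hh; simp at hh; simp [hh.1]
        · exact hh
      have := ih hm'
      cases b <;> simp_all <;> omega

lemma falseCount_insert_lt (V : PySem.Dict Int Bool) (t : Int) (h : V.get? t = some false) :
    falseCount (V.insert t true) < falseCount V := by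
  have hc : V.contains t = true := by
    rw [PySem.Dict.contains_eq_isSome_get?, h]; rfl
  have hi := PySem.Dict.items_insert_of_contains V (k := t) true hc
  have hmem : (t, false) ∈ V.items := PySem.Dict.mem_items_of_get?_eq_some V h
  unfold falseCount
  rw [hi]
  exact filtlen_map_lt t V.items hmem

lemma foldA_nil (P : PySem.Dict Int (List Int)) (f : Nat) (s : Int × PySem.Dict Int Bool) :
    foldA P f [] s = s := rfl

lemma foldA_cons (P : PySem.Dict Int (List Int)) (f : Nat) (e : Int) (L : List Int)
    (s : Int × PySem.Dict Int Bool) :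
    foldA P f (e :: L) s = foldA P f L (s.1 + (dfsGo P f e s.2).1, (dfsGo P f e s.2).2) := rfl

lemma foldA_shift (P : PySem.Dict Int (List Int)) (f : Nat) :
    ∀ (L : List Int) (s : Int × PySem.Dict Int Bool),
      foldA P f L s = (s.1 + (foldA P f L (0, s.2)).1, (foldA P f L (0, s.2)).2) := by
  intro L
  induction L with
  | nil => intro s; simp [foldA_nil]
  | cons e L ih =>
    intro s
    rw [foldA_cons, foldA_cons, ih, ih ((0 : Int) + (dfsGo P f e s.2).1, (dfsGo P f e s.2).2)]
    simp
    ring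

-- keys are preserved, the number of False entries never grows, and no entry goes back to False
lemma presFold (P : PySem.Dict Int (List Int)) :
    ∀ (f : Nat) (L : List Int) (s : Int × PySem.Dict Int Bool),
      (foldA P f L s).2.keys = s.2.keys ∧ falseCount (foldA P f L s).2 ≤ falseCount s.2 ∧
        ∀ y, (foldA P f L s).2.get? y = some false → s.2.get? y = some false := by
  intro f
  induction f with
  | zero =>
    intro L
    induction L with
    | nil => intro s; exact ⟨rfl, le_refl _, fun _ h => h⟩
    | cons e L ih =>
      intro s
      rw [foldA_cons, dfsGo_zero]
      exact ih _
  | succ f ihf =>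
    intro L
    induction L with
    | nil => intro s; exact ⟨rfl, le_refl _, fun _ h => h⟩
    | cons e L ih =>
      intro s
      rw [foldA_cons]
      have hstep : (dfsGo P (f+1) e s.2).2.keys = s.2.keys ∧
          falseCount (dfsGo P (f+1) e s.2).2 ≤ falseCount s.2 ∧
          ∀ y, (dfsGo P (f+1) e s.2).2.get? y = some false → s.2.get? y = some false := by
        cases ho : s.2.get? e with
        | none => rw [dfsGo_none P f e s.2 ho]; exact ⟨rfl, le_refl _, fun _ h => h⟩
        | some b =>
          cases b
          · rw [dfsGo_false P f e s.2 ho]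
            have hc : s.2.contains e = true := by
              rw [PySem.Dict.contains_eq_isSome_get?, ho]; rfl
            have hk := PySem.Dict.keys_insert_of_contains s.2 (k := e) true hc
            have hfc := falseCount_insert_lt s.2 e ho
            have := ihf ((P.get? e).getD []) (((((P.get? e).getD []).length : Int)), s.2.insert e true)
            refine ⟨by rw [this.1]; exact hk, ?_, ?_⟩
            · calc falseCount (foldA P f ((P.get? e).getD []) _).2
                    ≤ falseCount (s.2.insert e true) := this.2.1
                _ ≤ falseCount s.2 := le_of_lt hfc
            · intro y hy
              have h2 := this.2.2 y hy
              rw [PySem.Dict.get?_insert] at h2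
              by_cases hye : y = e
              · rw [if_pos hye] at h2; exact absurd h2 (by simp)
              · rw [if_neg hye] at h2; exact h2
          · rw [dfsGo_true P f e s.2 ho]; exact ⟨rfl, le_refl _, fun _ h => h⟩
      have := ih ((s.1 + (dfsGo P (f+1) e s.2).1, (dfsGo P (f+1) e s.2).2))
      exact ⟨by rw [this.1]; exact hstep.1, le_trans this.2.1 hstep.2.1,
        fun y hy => hstep.2.2 y (this.2.2 y hy)⟩

lemma falseCount_pos (V : PySem.Dict Int Bool) (t : Int) (h : V.get? t = some false) :
    1 ≤ falseCount V := by
  have hmem : (t, false) ∈ V.items := PySem.Dict.mem_items_of_get?_eq_some V h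
  have : (t, false) ∈ V.items.filter (fun p => !p.2) := List.mem_filter.mpr ⟨hmem, rfl⟩
  have := List.length_pos_of_mem this
  unfold falseCount
  omega

-- Main bridge: running the stack loop on L ++ st equals A-processing the list L first.
-- S is the certificate set from Pre_DFS (wrt the initial marking V0); the current V has the
-- same keys and only ever turns False entries True.
lemma stack_eq_fold (P : PySem.Dict Int (List Int)) (V0 : PySem.Dict Int Bool) (S : List Int)
    (hSK : ∀ x ∈ S, x ∈ V0.keys)
    (hSC : ∀ x ∈ S, V0.get? x = some false → ∀ adj, P.get? x = some adj → ∀ e ∈ adj, e ∈ S) :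
    ∀ (N : Nat) (L : List Int) (fa : Nat) (V : PySem.Dict Int Bool) (st : List Int) (acc : Int),
      falseCount V ≤ N → V.keys = V0.keys →
      (∀ y, V.get? y = some false → V0.get? y = some false) →
      (∀ x ∈ L, x ∈ S) → falseCount V < fa →
      dfsStack P (L ++ st) V acc
        = dfsStack P st (foldA P fa L (0, V)).2 (acc + (foldA P fa L (0, V)).1) := by
  intro N
  induction N using Nat.strong_induction_on with
  | _ N ihN =>
  intro L
  induction L with
  | nil =>
    intro fa V st acc _ _ _ _ _
    simp [foldA]
  | cons x L ihL =>
    intro fa V st acc hN hkeys0 hadv hK hfa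
    obtain ⟨k, rfl⟩ : ∃ k, fa = k + 1 := ⟨fa - 1, by omega⟩
    have hxS : x ∈ S := hK x (by simp)
    obtain ⟨b, hb⟩ := get?_of_mem_keys V x (by rw [hkeys0]; exact hSK x hxS)
    cases b
    · -- unvisited: expand x
      have hb0 : V0.get? x = some false := hadv x hb
      have hc : V.contains x = true := by
        rw [PySem.Dict.contains_eq_isSome_get?, hb]; rfl
      have hkeys : (V.insert x true).keys = V.keys :=
        PySem.Dict.keys_insert_of_contains V (k := x) true hc
      have hfc : falseCount (V.insert x true) < falseCount V := falseCount_insert_lt V x hb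
      have hpos : 1 ≤ falseCount V := falseCount_pos V x hb
      set adj := (P.get? x).getD [] with hadj
      set V1 := V.insert x true with hV1
      have hadjS : ∀ e ∈ adj, e ∈ S := by
        intro e he
        cases hP : P.get? x with
        | none => rw [hadj] at he; simp [hP] at he
        | some a =>
          have : adj = a := by rw [hadj, hP]; rfl
          exact hSC x hxS hb0 a hP e (this ▸ he)
      have hadv1 : ∀ y, V1.get? y = some false → V0.get? y = some false := by
        intro y hy
        rw [hV1, PySem.Dict.get?_insert] at hy
        by_cases hyx : y = x
        · rw [if_pos hyx] at hy; exact absurd hy (by simp)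
        · rw [if_neg hyx] at hy; exact hadv y hy
      rw [show (x :: L) ++ st = x :: (L ++ st) from rfl, dfsStack_false P x (L ++ st) V acc hb]
      have hN1 : falseCount V1 ≤ N - 1 := by omega
      have hfa1 : falseCount V1 < k := by omega
      have hNlt : N - 1 < N := by omega
      rw [← hadj, ← hV1]
      rw [ihN (N - 1) hNlt adj k V1 (L ++ st) (acc + (adj.length : Int)) hN1
        (by rw [hV1, hkeys]; exact hkeys0) hadv1 hadjS hfa1]
      set W1 := (foldA P k adj (0, V1)).2 with hW1
      set R1 := (foldA P k adj (0, V1)).1 with hR1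
      have hpres := presFold P k adj (0, V1)
      have hW1keys : W1.keys = V0.keys := by
        rw [hW1, hpres.1]
        show V1.keys = V0.keys
        rw [hV1, hkeys]; exact hkeys0
      have hW1fc : falseCount W1 ≤ falseCount V1 := hpres.2.1
      have hW1adv : ∀ y, W1.get? y = some false → V0.get? y = some false := by
        intro y hy
        exact hadv1 y (hpres.2.2 y hy)
      rw [ihN (N - 1) hNlt L (k + 1) W1 st (acc + (adj.length : Int) + R1) (by omega)
        hW1keys hW1adv (fun e he => hK e (by simp [he])) (by omega)]
      rw [foldA_cons, dfsGo_false P k x V hb, ← hadj, ← hV1]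
      rw [foldA_shift P k adj (((adj.length : Int)), V1), ← hW1, ← hR1]
      rw [show ((0 : Int) + ((adj.length : Int) + R1), W1) = (((adj.length : Int) + R1), W1) by simp]
      rw [foldA_shift P (k+1) L (((adj.length : Int) + R1), W1)]
      simp only []
      have : acc + (adj.length : Int) + R1 + (foldA P (k+1) L (0, W1)).1
           = acc + ((adj.length : Int) + R1 + (foldA P (k+1) L (0, W1)).1) := by ring
      rw [this]
    · -- visited: skip x
      rw [show (x :: L) ++ st = x :: (L ++ st) from rfl, dfsStack_true P x (L ++ st) V acc hb]
      rw [foldA_cons, dfsGo_true P k x V hb]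
      rw [show ((0 : Int) + (((0 : Int), V)).1, (((0 : Int), V)).2) = (((0 : Int), V)) by simp]
      exact ihL (k+1) V st acc hN hkeys0 hadv (fun e he => hK e (by simp [he])) hfa

lemma keys_mk_eq (l : List (Int × Bool)) : (PySem.Dict.mk l).keys = l.map Prod.fst := rfl

lemma items_mk_eq (l : List (Int × Bool)) : (PySem.Dict.mk l).items = l := rfl

lemma falseCount_mk_le (V : List (Int × Bool)) : falseCount (PySem.Dict.mk V) ≤ V.length := by
  unfold falseCount
  rw [items_mk_eq]
  exact List.length_filter_le _ _

lemma DFS_eq (P : List (Int × List Int)) (t : Int) (V : List (Int × Bool))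
    (hPre : Pre_DFS P t V) : DFS P t V = DFS_alt P t V := by
  obtain ⟨S, hSsub, htS, hScl⟩ := hPre
  have hSK : ∀ x ∈ S, x ∈ (PySem.Dict.mk V).keys := by
    intro x hx
    rw [keys_mk_eq]
    exact (List.mem_sublists.mp hSsub).mem hx
  unfold DFS DFS_alt
  have htV' : t ∈ (PySem.Dict.mk V).keys := hSK t htS
  obtain ⟨b, hb⟩ := get?_of_mem_keys (PySem.Dict.mk V) t htV'
  cases b
  · -- V[t] is False: both sides really traverse
    have hc : (PySem.Dict.mk V).contains t = true := by
      rw [PySem.Dict.contains_eq_isSome_get?, hb]; rfl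
    have hkeys := PySem.Dict.keys_insert_of_contains (PySem.Dict.mk V) (k := t) true hc
    have hfc := falseCount_insert_lt (PySem.Dict.mk V) t hb
    have hle := falseCount_mk_le V
    set Pd := PySem.Dict.mk P with hPd
    set Vd := PySem.Dict.mk V with hVd
    set adj := (Pd.get? t).getD [] with hadj
    set V1 := Vd.insert t true with hV1
    have hadjS : ∀ e ∈ adj, e ∈ S := by
      intro e he
      cases hP : Pd.get? t with
      | none => rw [hadj] at he; simp [hP] at he
      | some a =>
        have : adj = a := by rw [hadj, hP]; rfl
        exact (hScl t htS hb).2 a hP e (this ▸ he)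
    have hadv1 : ∀ y, V1.get? y = some false → Vd.get? y = some false := by
      intro y hy
      rw [hV1, PySem.Dict.get?_insert] at hy
      by_cases hyt : y = t
      · rw [if_pos hyt] at hy; exact absurd hy (by simp)
      · rw [if_neg hyt] at hy; exact hy
    rw [dfsGo_false Pd V.length t Vd hb, ← hadj, ← hV1]
    rw [dfsStack_false Pd t [] Vd 0 hb, ← hadj, ← hV1]
    have hlen : 1 ≤ V.length := by
      cases V with
      | nil => rw [hVd] at htV'; simp [keys_mk_eq] at htV'
      | cons _ _ => simp
    rw [stack_eq_fold Pd Vd S hSK (fun x hx hf => (hScl x hx hf).2) (falseCount V1) adj V.length V1 [] (0 + ((adj.length : Int)))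
      (le_refl _) (by rw [hV1, hkeys]) hadv1 hadjS (by omega)]
    rw [dfsStack_nil]
    rw [foldA_shift Pd V.length adj (((adj.length : Int)), V1)]
    simp only []
    ring_nf
  · -- V[t] is True: both sides return 0
    rw [dfsGo_true (PySem.Dict.mk P) V.length t _ hb]
    rw [dfsStack_true (PySem.Dict.mk P) t [] (PySem.Dict.mk V) 0 hb, dfsStack_nil]

-- ===== VERDICT (by name: the statement is the Claim_ definition above) =====
theorem DFS_spec : Claim_equal_DFS := by
  intro P t V _ hPre
  exact DFS_eq P t V hPre
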